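-- pv_equiv track=rewrite | github.com/aeonbridge/ab-instagram-video-processor | ab/dc/publishers/agents/metadata_generator_agent.py | _extract_transcript_text
-- ===== SOURCE A (Python) =====
-- def _extract_transcript_text(markdown_content: str) -> str:
--     """Extract just the transcript text from markdown"""
--
--     # If it's a simple text file (text_only mode)
--     if not markdown_content.startswith('#'):
--         return markdown_content.strip()
--
--     # Extract from markdown format
--     lines = markdown_content.split('\n')
--     in_transcript = False
--     transcript_lines = []
--
--     for line in lines:
--         if line.startswith('## Video Transcript'):
--             in_transcript = True
--             continue
--         elif line.startswith('---') or line.startswith('##'):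
--             in_transcript = False
--             continue
--
--         if in_transcript and line.strip():
--             transcript_lines.append(line.strip())
--
--     return ' '.join(transcript_lines)
-- ===== SOURCE B (Python) =====
-- def _extract_transcript_text(markdown_content: str) -> str:
--     """Extract just the transcript text from markdown"""
--
--     if not markdown_content.startswith('#'):
--         return markdown_content.strip()
--
--     # Phase 1: one pass splitting the document into sections (header, body_lines);
--     # a new section starts at any line beginning with '##' or '---'.
--     sections = []
--     header, body = None, []
--     for line in markdown_content.split('\n'):
--         if line.startswith('##') or line.startswith('---'):
--             sections.append((header, body))
--             header, body = line, []
--         else: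
--             body.append(line)
--     sections.append((header, body))
--
--     # Phase 2: collect the stripped non-empty body lines of every transcript section.
--     result = []
--     for hdr, sec_body in sections:
--         if hdr is not None and hdr.startswith('## Video Transcript'):
--             result.extend(s.strip() for s in sec_body if s.strip())
--     return ' '.join(result)
-- ===== Notes on version B (the rewrite author's own statement) =====
-- stated objective: alternative
-- what changed: Replaces A's single pass with a stateful in_transcript toggle by a two-phase design: one pass groups the lines into (header, body) sections cut at boundary lines, then a second pass collects the stripped non-empty body lines of the sections whose header marks a transcript.
import Mathlib
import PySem

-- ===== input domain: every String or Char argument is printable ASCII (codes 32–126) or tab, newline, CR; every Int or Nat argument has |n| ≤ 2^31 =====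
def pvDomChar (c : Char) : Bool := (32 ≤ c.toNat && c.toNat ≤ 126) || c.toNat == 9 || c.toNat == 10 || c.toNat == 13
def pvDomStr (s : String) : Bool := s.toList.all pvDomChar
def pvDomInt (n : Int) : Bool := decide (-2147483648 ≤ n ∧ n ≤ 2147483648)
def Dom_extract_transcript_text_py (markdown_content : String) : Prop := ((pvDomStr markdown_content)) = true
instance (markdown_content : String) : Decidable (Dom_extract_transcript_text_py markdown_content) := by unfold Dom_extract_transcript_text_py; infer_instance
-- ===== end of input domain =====

-- B restructures A's toggle-state scan into two phases: split the lines into (header, body) sections, then collect the transcript sections (objective: alternative decomposition).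

-- ===== PORT A =====
-- the body of A's for-loop, over the state (in_transcript, transcript_lines)
def stepA (st : Bool × List String) (line : String) : Bool × List String :=
  if PySem.Str.startswith line "## Video Transcript" then (true, st.2)
  else if PySem.Str.startswith line "---" || PySem.Str.startswith line "##" then (false, st.2)
  else if st.1 && (PySem.Str.strip line != "") then (st.1, st.2 ++ [PySem.Str.strip line])
  else st

def extract_transcript_text_py (markdown_content : String) : String :=
  if !(PySem.Str.startswith markdown_content "#") then
    PySem.Str.strip markdown_content
  else
    -- markdown_content.split('\n'); split? is `some` since the separator "\n" is nonempty
    let lines := (PySem.Str.split? markdown_content "\n").getD []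
    let st := lines.foldl stepA (false, [])
    PySem.Str.join " " st.2

-- ===== PORT B =====
-- phase 1: build the list of sections (header, body); the open section is carried as (h, b)
def sectionsB : List String → Option String → List String → List (Option String × List String)
  | [], h, b => [(h, b)]
  | l :: ls, h, b =>
    if PySem.Str.startswith l "##" || PySem.Str.startswith l "---" then
      (h, b) :: sectionsB ls (some l) []
    else
      sectionsB ls h (b ++ [l])

-- '[s.strip() for s in sec_body if s.strip()]'
def stripBody (body : List String) : List String :=
  (body.filter (fun s => PySem.Str.strip s != "")).map PySem.Str.strip

-- 'hdr is not None and hdr.startswith('## Video Transcript')'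
def isVT : Option String → Bool
  | some h => PySem.Str.startswith h "## Video Transcript"
  | none => false

-- the body of B's phase-2 for-loop
def stepC (acc : List String) (sec : Option String × List String) : List String :=
  if isVT sec.1 then acc ++ stripBody sec.2 else acc

def extract_transcript_text_py_alt (markdown_content : String) : String :=
  if !(PySem.Str.startswith markdown_content "#") then
    PySem.Str.strip markdown_content
  else
    let sections := sectionsB ((PySem.Str.split? markdown_content "\n").getD []) none []
    PySem.Str.join " " (sections.foldl stepC [])

-- ===== PRECONDITION & SPEC =====
def Spec_extract_transcript_text_py (markdown_content : String) (out : String) : Prop := out = extract_transcript_text_py_alt markdown_content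
instance (markdown_content : String) (out : String) : Decidable (Spec_extract_transcript_text_py markdown_content out) := by unfold Spec_extract_transcript_text_py; infer_instance

-- ===== CLAIM (what is proved, stated in full; the proofs are below) =====
def Claim_equal_extract_transcript_text_py : Prop := ∀ (markdown_content : String), Dom_extract_transcript_text_py markdown_content → Spec_extract_transcript_text_py markdown_content (extract_transcript_text_py markdown_content)

-- ===== LEMMAS AND PROOFS =====

-- the transition and output of one iteration of A's loop, separated for the proofs
def nextT (inT : Bool) (l : String) : Bool :=
  if PySem.Str.startswith l "## Video Transcript" then true
  else if PySem.Str.startswith l "---" || PySem.Str.startswith l "##" then false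
  else inT

def emit (inT : Bool) (l : String) : List String :=
  if PySem.Str.startswith l "## Video Transcript" then []
  else if PySem.Str.startswith l "---" || PySem.Str.startswith l "##" then []
  else if inT && (PySem.Str.strip l != "") then [PySem.Str.strip l]
  else []

theorem stepA_eq (inT : Bool) (acc : List String) (l : String) :
    stepA (inT, acc) l = (nextT inT l, acc ++ emit inT l) := by
  simp only [stepA, nextT, emit]
  split_ifs <;> simp_all

-- A's loop only appends: the lines collected are independent of the initial accumulator
theorem foldl_stepA_acc (ls : List String) (inT : Bool) (acc : List String) :
    (ls.foldl stepA (inT, acc)).2 = acc ++ (ls.foldl stepA (inT, [])).2 := by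
  induction ls generalizing inT acc with
  | nil => simp
  | cons l ls ih =>
    rw [List.foldl_cons, List.foldl_cons, stepA_eq inT acc l, stepA_eq inT [] l,
        ih (nextT inT l) (acc ++ emit inT l), ih (nextT inT l) ([] ++ emit inT l)]
    simp

-- B's phase-2 loop only appends
theorem foldl_stepC_acc (secs : List (Option String × List String)) (acc : List String) :
    secs.foldl stepC acc = acc ++ secs.foldl stepC [] := by
  induction secs generalizing acc with
  | nil => simp
  | cons s secs ih =>
    rw [List.foldl_cons, List.foldl_cons, ih, ih (stepC [] s)]
    simp only [stepC]
    split_ifs <;> simp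

theorem startswith_VT_hash (l : String)
    (h : PySem.Str.startswith l "## Video Transcript" = true) :
    PySem.Str.startswith l "##" = true := by
  simp only [PySem.Str.startswith_eq, PySem.Chars.startswith_iff] at h ⊢
  exact List.IsPrefix.trans (by decide) h

-- main invariant: collecting B's sections equals A's loop, given the open section (h, b)
theorem main_inv (ls : List String) (h : Option String) (b : List String) :
    (sectionsB ls h b).foldl stepC [] =
      (if isVT h then stripBody b else []) ++ (ls.foldl stepA (isVT h, [])).2 := by
  induction ls generalizing h b with
  | nil => simp [sectionsB, stepC]
  | cons l ls ih =>
    by_cases hbq : (PySem.Str.startswith l "##" || PySem.Str.startswith l "---") = true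
    · rw [sectionsB, if_pos hbq, List.foldl_cons, foldl_stepC_acc, ih,
          List.foldl_cons, stepA_eq]
      have hb' : (PySem.Str.startswith l "---" || PySem.Str.startswith l "##") = true := by
        rcases Bool.or_eq_true_iff.mp hbq with h2 | h2 <;> rw [h2] <;> simp
      have hnext : nextT (isVT h) l = isVT (some l) := by
        simp only [nextT, isVT]
        cases hv : PySem.Str.startswith l "## Video Transcript" with
        | true => simp
        | false => rw [if_neg (by simp), if_pos hb']
      have hemit : emit (isVT h) l = [] := by
        simp only [emit]
        cases hv : PySem.Str.startswith l "## Video Transcript" with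
        | true => simp
        | false => rw [if_neg (by simp), if_pos hb']
      have hstep : stepC [] (h, b) = (if isVT h then stripBody b else []) := by
        simp only [stepC]; split_ifs <;> simp
      rw [hnext, hemit, hstep]
      simp [stripBody]
    · have hv : PySem.Str.startswith l "## Video Transcript" = false := by
        cases hq : PySem.Str.startswith l "## Video Transcript"
        · rfl
        · exact absurd (by rw [startswith_VT_hash l hq]; simp) hbq
      have hb2 : (PySem.Str.startswith l "---" || PySem.Str.startswith l "##") = false := by
        cases h1 : PySem.Str.startswith l "---" <;> cases h2 : PySem.Str.startswith l "##" <;>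
          simp_all
      rw [sectionsB, if_neg hbq, ih, List.foldl_cons, stepA_eq]
      have hnext : nextT (isVT h) l = isVT h := by
        simp only [nextT]
        rw [if_neg (by rw [hv]; simp), if_neg (by rw [hb2]; simp)]
      have hemit : emit (isVT h) l =
          if isVT h && (PySem.Str.strip l != "") then [PySem.Str.strip l] else [] := by
        simp only [emit]
        rw [if_neg (by rw [hv]; simp), if_neg (by rw [hb2]; simp)]
      rw [hnext, hemit]
      cases hT : isVT h with
      | false => simp
      | true =>
        cases hs : (PySem.Str.strip l != "") with
        | false => simp [stripBody, hs]
        | true =>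
          simp only [Bool.true_and, if_pos, List.nil_append]
          rw [foldl_stepA_acc ls true [PySem.Str.strip l]]
          simp [stripBody, hs]

-- ===== VERDICT (by name: the statement is the Claim_ definition above) =====
theorem extract_transcript_text_py_spec : Claim_equal_extract_transcript_text_py := by
  intro markdown_content _
  unfold Spec_extract_transcript_text_py extract_transcript_text_py extract_transcript_text_py_alt
  cases h : PySem.Str.startswith markdown_content "#" with
  | false => simp
  | true =>
    simp only [Bool.not_true, Bool.false_eq_true, if_false]
    rw [main_inv]
    simp [isVT]
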